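-- pv_equiv track=rewrite | github.com/finlay96/WhatGoesAround | runners/LaSOT/split_to_make_out_of_view_clips.py | pad_clips
-- ===== SOURCE A (Python) =====
-- def pad_clips(clips, data, pad_size=3):
--     padded_clips = []
--     max_frame_idx = len(data) - 1
--     for start, end in clips:
--         padded_start = start - pad_size
--         padded_end = end + pad_size
--         if padded_start < 0 or padded_end > max_frame_idx:
--             continue
--         is_valid = True
--
--         # Check prior padding (must be 0s)
--         for i in range(padded_start, start):
--             if data[i] == 1:  # Fail if it's a 1
--                 is_valid = False
--                 break
--
--         if not is_valid:
--             continue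
--
--         # Check end padding (must be 0s)
--         for i in range(end + 1, padded_end + 1):
--             if data[i] == 1:  # Fail if it's a 1
--                 is_valid = False
--                 break
--
--         if is_valid:
--             padded_clips.append((padded_start, padded_end))
--
--     return padded_clips
-- ===== SOURCE B (Python) =====
-- def pad_clips(clips, data, pad_size=3):
--     # One prefix-count pass over data, then per-clip window checks by prefix differences.
--     pre = [0]
--     c = 0
--     for v in data:
--         c += 1 if v == 1 else 0
--         pre.append(c)
--     n = len(data)
--
--     def ones(a, b):  # number of 1s in data[a:b] (empty window -> 0)
--         return pre[b] - pre[a] if b > a else 0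
--
--     out = []
--     for start, end in clips:
--         padded_start = start - pad_size
--         padded_end = end + pad_size
--         if padded_start < 0 or padded_end > n - 1:
--             continue
--         if ones(padded_start, start) == 0 and ones(end + 1, padded_end + 1) == 0:
--             out.append((padded_start, padded_end))
--     return out
-- ===== Notes on version B (the rewrite author's own statement) =====
-- stated objective: alternative
-- what changed: B builds a prefix count of 1s over data in one pass and decides each clip's two padding windows by prefix-sum differences, instead of A's per-clip element-by-element scans of both windows.
-- outside the precondition, e.g. on pad_clips([(5, 0)], [0, 0, 1, 0], 3): A returns [], B raises IndexError; on pad_clips([(4, -2)], [1, 0, 0, 0], 3): A returns [], B returns [(1, 1)]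
import Mathlib
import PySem

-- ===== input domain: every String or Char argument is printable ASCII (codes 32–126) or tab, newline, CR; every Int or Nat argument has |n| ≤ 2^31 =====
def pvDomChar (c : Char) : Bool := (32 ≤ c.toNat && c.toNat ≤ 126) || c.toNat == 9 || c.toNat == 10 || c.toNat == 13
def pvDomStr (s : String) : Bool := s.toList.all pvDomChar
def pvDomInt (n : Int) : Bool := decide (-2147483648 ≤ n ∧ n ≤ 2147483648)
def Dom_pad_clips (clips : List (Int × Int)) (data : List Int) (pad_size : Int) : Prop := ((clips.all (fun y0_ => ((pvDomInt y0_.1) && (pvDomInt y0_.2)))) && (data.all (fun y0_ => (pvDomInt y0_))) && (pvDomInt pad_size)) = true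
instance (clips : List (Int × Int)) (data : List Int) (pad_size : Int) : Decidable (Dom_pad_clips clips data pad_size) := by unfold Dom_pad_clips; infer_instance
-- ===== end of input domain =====

-- B replaces A's per-clip padding-window scans by one prefix-count pass over data and
-- constant-count window checks per clip (objective: alternative algorithm, same cost overall).

-- ===== PORT A =====
-- inner 'for i in range(a, b): if data[i] == 1: break' loop of A, rendered as an all-check;
-- pyGetD with default 0 is exact here because Pre_ keeps every visited index in range.
def pvScanNoOnes (data : List Int) (a b : Int) : Bool :=
  (PySem.List.pyRange a b 1).all (fun i => !(PySem.List.pyGetD data i 0 == 1))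

def pad_clips (clips : List (Int × Int)) (data : List Int) (pad_size : Int) : List (Int × Int) :=
  let max_frame_idx : Int := (data.length : Int) - 1
  clips.foldl (fun padded_clips se =>
    let padded_start := se.1 - pad_size
    let padded_end := se.2 + pad_size
    if padded_start < 0 ∨ padded_end > max_frame_idx then padded_clips
    else if pvScanNoOnes data padded_start se.1 then
      if pvScanNoOnes data (se.2 + 1) (padded_end + 1) then padded_clips ++ [(padded_start, padded_end)]
      else padded_clips
    else padded_clips) []

-- ===== PORT B =====
-- 'pre = [0]; c = 0; for v in data: c += 1 if v == 1 else 0; pre.append(c)'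
def pvPreBuild (data : List Int) : List Int × Int :=
  data.foldl (fun st v =>
    (st.1 ++ [st.2 + (if v == 1 then 1 else 0)], st.2 + (if v == 1 then 1 else 0))) ([0], 0)

-- 'ones(a, b) = pre[b] - pre[a] if b > a else 0'; pyGetD default 0 exact under Pre_ as above.
def pvOnes (pre : List Int) (a b : Int) : Int :=
  if b > a then PySem.List.pyGetD pre b 0 - PySem.List.pyGetD pre a 0 else 0

def pad_clips_alt (clips : List (Int × Int)) (data : List Int) (pad_size : Int) : List (Int × Int) :=
  let pre := (pvPreBuild data).1
  let n : Int := data.length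
  clips.foldl (fun out se =>
    let padded_start := se.1 - pad_size
    let padded_end := se.2 + pad_size
    if padded_start < 0 ∨ padded_end > n - 1 then out
    else if pvOnes pre padded_start se.1 = 0 ∧ pvOnes pre (se.2 + 1) (padded_end + 1) = 0 then
      out ++ [(padded_start, padded_end)]
    else out) []

-- ===== PRECONDITION & SPEC =====
-- Pre_ excludes clips that pass the bounds check but, with a positive pad_size, have start
-- beyond len(data) or end below -1: there A's scans either raise IndexError or hit Python's
-- accidental negative-index wraparound / partial scan, while B's prefix lookups raise
-- IndexError or wrap differently — out-of-range frame indices are outside the natural domain.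
def Pre_pad_clips (clips : List (Int × Int)) (data : List Int) (pad_size : Int) : Prop :=
  ∀ se ∈ clips, (0 ≤ se.1 - pad_size ∧ se.2 + pad_size ≤ (data.length : Int) - 1) →
    (0 < pad_size → se.1 ≤ (data.length : Int) ∧ -1 ≤ se.2)
instance (clips : List (Int × Int)) (data : List Int) (pad_size : Int) : Decidable (Pre_pad_clips clips data pad_size) := by unfold Pre_pad_clips; infer_instance
def pvWitness_pad_clips : (List (Int × Int)) × List Int × Int := ([(3, 4), (1, 2)], [0, 1, 0, 0, 0, 0, 0, 1], 2)

def Spec_pad_clips (clips : List (Int × Int)) (data : List Int) (pad_size : Int) (out : List (Int × Int)) : Prop := out = pad_clips_alt clips data pad_size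
instance (clips : List (Int × Int)) (data : List Int) (pad_size : Int) (out : List (Int × Int)) : Decidable (Spec_pad_clips clips data pad_size out) := by unfold Spec_pad_clips; infer_instance

-- ===== CLAIM (what is proved, stated in full; the proofs are below) =====
def Claim_equal_pad_clips : Prop := ∀ (clips : List (Int × Int)) (data : List Int) (pad_size : Int), Dom_pad_clips clips data pad_size → Pre_pad_clips clips data pad_size → Spec_pad_clips clips data pad_size (pad_clips clips data pad_size)

-- ===== LEMMAS AND PROOFS =====

-- number of 1-entries, as an Int
def pvCnt (l : List Int) : Int := (l.countP (fun v => v == 1) : Int)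

lemma pvCnt_append (l l' : List Int) : pvCnt (l ++ l') = pvCnt l + pvCnt l' := by
  simp [pvCnt, List.countP_append]

lemma pvPreBuild_eq (data : List Int) :
    pvPreBuild data =
      ((List.range (data.length + 1)).map (fun i => pvCnt (data.take i)), pvCnt data) := by
  induction data using List.reverseRecOn with
  | nil => simp [pvPreBuild, pvCnt]
  | append_singleton l x ih =>
      have hstep : pvPreBuild (l ++ [x]) =
          ((pvPreBuild l).1 ++ [(pvPreBuild l).2 + (if x == 1 then 1 else 0)],
           (pvPreBuild l).2 + (if x == 1 then 1 else 0)) := by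
        simp [pvPreBuild, List.foldl_append]
      have hcnt : pvCnt (l ++ [x]) = pvCnt l + (if x == 1 then 1 else 0) := by
        rw [pvCnt_append]; simp [pvCnt]
      have hmap : (List.range ((l ++ [x]).length + 1)).map (fun i => pvCnt ((l ++ [x]).take i)) =
          (List.range (l.length + 1)).map (fun i => pvCnt (l.take i)) ++ [pvCnt (l ++ [x])] := by
        have hlen : (l ++ [x]).length + 1 = (l.length + 1) + 1 := by simp
        rw [hlen, List.range_succ, List.map_append]
        congr 1
        · refine List.map_congr_left ?_
          intro i hi
          rw [List.mem_range] at hi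
          rw [List.take_append_of_le_length (by omega)]
        · have ht : (l ++ [x]).take (l.length + 1) = l ++ [x] :=
            List.take_of_length_le (by simp)
          simp [ht]
      rw [hstep, ih]
      refine Prod.ext ?_ (by simp [hcnt])
      show (List.range (l.length + 1)).map (fun i => pvCnt (l.take i)) ++ [pvCnt l + (if x == 1 then 1 else 0)] =
        ((List.range ((l ++ [x]).length + 1)).map (fun i => pvCnt ((l ++ [x]).take i)), pvCnt (l ++ [x])).1
      rw [hmap, hcnt]

lemma pvPre_get (data : List Int) (k : Nat) (hk : k ≤ data.length) :
    PySem.List.pyGetD (pvPreBuild data).1 (k : Int) 0 = pvCnt (data.take k) := by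
  have hk' : k < data.length + 1 := by omega
  simp [pvPreBuild_eq, PySem.List.pyGetD_natCast, List.getD_eq_getElem?_getD, hk']

lemma pvScan_iff (data : List Int) (a b : Nat) (hab : a ≤ b) (hb : b ≤ data.length) :
    pvScanNoOnes data (a : Int) (b : Int) = true ↔ pvCnt ((data.drop a).take (b - a)) = 0 := by
  have hdrop : (PySem.List.pyRange (a : Int) (data.length : Int) 1).map
      (fun j => PySem.List.pyGetD data j 0) = data.drop a := by
    have h := PySem.List.map_pyGetD_pyRange' (xs := data) (a := (a : Int)) (d := 0)
      (by exact_mod_cast Int.natCast_nonneg a)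
    simpa using h
  have hsplit : PySem.List.pyRange (a : Int) (data.length : Int) 1 =
      PySem.List.pyRange (a : Int) (b : Int) 1 ++ PySem.List.pyRange (b : Int) (data.length : Int) 1 :=
    PySem.List.pyRange_one_append _ _ _ (by exact_mod_cast hab) (by exact_mod_cast hb)
  have hlen : ((PySem.List.pyRange (a : Int) (b : Int) 1).map
      (fun j => PySem.List.pyGetD data j 0)).length = b - a := by
    simp only [List.length_map, PySem.List.length_pyRange_one]
    omega
  have hslice : (PySem.List.pyRange (a : Int) (b : Int) 1).map
      (fun j => PySem.List.pyGetD data j 0) = (data.drop a).take (b - a) := by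
    rw [← hdrop, hsplit, List.map_append, ← hlen, List.take_left]
  have hall : pvScanNoOnes data (a : Int) (b : Int) =
      ((data.drop a).take (b - a)).all (fun v => !(v == 1)) := by
    rw [← hslice, pvScanNoOnes, List.all_map]
    rfl
  rw [hall]
  simp [pvCnt, List.countP_eq_zero, List.all_eq_true]

lemma pvCnt_take_sub (data : List Int) (a b : Nat) (hab : a ≤ b) :
    pvCnt (data.take b) - pvCnt (data.take a) = pvCnt ((data.drop a).take (b - a)) := by
  have : data.take b = data.take a ++ (data.drop a).take (b - a) := by
    rw [← List.take_add]
    congr 1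
    omega
  rw [this, pvCnt_append]
  ring

-- A's scan succeeds iff B's prefix-difference is zero, for any window A and B both reach
lemma pvWindow_eq (data : List Int) (a b : Int) (ha : 0 ≤ a) (hb : b ≤ (data.length : Int)) :
    (pvScanNoOnes data a b = true) ↔ pvOnes (pvPreBuild data).1 a b = 0 := by
  by_cases h : b > a
  · have hab : a.toNat ≤ b.toNat := by omega
    have hbl : b.toNat ≤ data.length := by omega
    have hca : (a.toNat : Int) = a := by omega
    have hcb : (b.toNat : Int) = b := by omega
    rw [pvOnes, if_pos h, ← hca, ← hcb, pvPre_get data _ hbl, pvPre_get data _ (le_trans hab hbl),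
      pvCnt_take_sub data _ _ hab, pvScan_iff data _ _ hab hbl]
  · have hr : PySem.List.pyRange a b 1 = [] := PySem.List.pyRange_one_eq_nil (by omega)
    simp [pvScanNoOnes, hr, pvOnes, h]

lemma pvFoldl_congr {a b : Type} (l : List a) (f g : b → a → b) (init : b)
    (h : ∀ x ∈ l, ∀ acc, f acc x = g acc x) : l.foldl f init = l.foldl g init := by
  induction l generalizing init with
  | nil => rfl
  | cons y ys ih => simp only [List.foldl_cons, h y (by simp)]; exact ih _ (fun x hx acc => h x (List.mem_cons_of_mem y hx) acc)

lemma pvStep_eq (data : List Int) (pad_size : Int) (se : Int × Int)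
    (hse : (0 ≤ se.1 - pad_size ∧ se.2 + pad_size ≤ (data.length : Int) - 1) →
      (0 < pad_size → se.1 ≤ (data.length : Int) ∧ -1 ≤ se.2))
    (acc : List (Int × Int)) :
    (if se.1 - pad_size < 0 ∨ se.2 + pad_size > (data.length : Int) - 1 then acc
     else if pvScanNoOnes data (se.1 - pad_size) se.1 then
       if pvScanNoOnes data (se.2 + 1) (se.2 + pad_size + 1) then acc ++ [(se.1 - pad_size, se.2 + pad_size)]
       else acc
     else acc) =
    (if se.1 - pad_size < 0 ∨ se.2 + pad_size > (data.length : Int) - 1 then acc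
     else if pvOnes (pvPreBuild data).1 (se.1 - pad_size) se.1 = 0 ∧
             pvOnes (pvPreBuild data).1 (se.2 + 1) (se.2 + pad_size + 1) = 0 then
       acc ++ [(se.1 - pad_size, se.2 + pad_size)]
     else acc) := by
  by_cases hg : se.1 - pad_size < 0 ∨ se.2 + pad_size > (data.length : Int) - 1
  · rw [if_pos hg, if_pos hg]
  · rw [if_neg hg, if_neg hg]
    have hps : 0 ≤ se.1 - pad_size := by omega
    have hpe : se.2 + pad_size ≤ (data.length : Int) - 1 := by omega
    have h1 : (pvScanNoOnes data (se.1 - pad_size) se.1 = true) ↔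
        pvOnes (pvPreBuild data).1 (se.1 - pad_size) se.1 = 0 := by
      by_cases hp : 0 < pad_size
      · exact pvWindow_eq data _ _ (by omega) (by have := (hse ⟨by omega, by omega⟩ hp).1; omega)
      · have hr : PySem.List.pyRange (se.1 - pad_size) se.1 1 = [] :=
          PySem.List.pyRange_one_eq_nil (by omega)
        simp [pvScanNoOnes, hr, pvOnes]
        omega
    have h2 : (pvScanNoOnes data (se.2 + 1) (se.2 + pad_size + 1) = true) ↔
        pvOnes (pvPreBuild data).1 (se.2 + 1) (se.2 + pad_size + 1) = 0 := by
      by_cases hp : 0 < pad_size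
      · exact pvWindow_eq data _ _ (by have := (hse ⟨by omega, by omega⟩ hp).2; omega) (by omega)
      · have hr : PySem.List.pyRange (se.2 + 1) (se.2 + pad_size + 1) 1 = [] :=
          PySem.List.pyRange_one_eq_nil (by omega)
        simp [pvScanNoOnes, hr, pvOnes]
        omega
    by_cases s1 : pvScanNoOnes data (se.1 - pad_size) se.1
    · by_cases s2 : pvScanNoOnes data (se.2 + 1) (se.2 + pad_size + 1)
      · rw [if_pos s1, if_pos s2, if_pos ⟨h1.mp s1, h2.mp s2⟩]
      · rw [if_pos s1, if_neg s2, if_neg (by intro ⟨_, c2⟩; exact s2 (h2.mpr c2))]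
    · rw [if_neg s1, if_neg (by intro ⟨c1, _⟩; exact s1 (h1.mpr c1))]

-- ===== VERDICT (by name: the statement is the Claim_ definition above) =====
theorem pad_clips_spec : Claim_equal_pad_clips := by
  intro clips data pad_size _ hpre
  unfold Spec_pad_clips pad_clips pad_clips_alt
  refine pvFoldl_congr clips _ _ [] ?_
  intro se hmem acc
  exact pvStep_eq data pad_size se (hpre se hmem) acc
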